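-- pv_equiv track=rewrite | github.com/arcade-cabinet/dragons-labyrinth | src/generator/entities/processors/meta.py | _map_political_control
-- ===== SOURCE A (Python) =====
-- from typing import Any
--
-- def _map_political_control(map_tiles: list[dict], regions: dict[str, str]) -> dict[str, Any]:
--     """Map political control patterns."""
--     region_control = {}
--
--     for tile in map_tiles:
--         region_id = tile.get("region")
--         region_name = regions.get(region_id, "Unknown")
--
--         if region_name not in region_control:
--             region_control[region_name] = {"tiles": 0, "settlements": 0, "dungeons": 0}
--
--         region_control[region_name]["tiles"] += 1
--
--         feature = tile.get("feature", "")
--         if feature in ["Village", "Town", "City"]: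
--             region_control[region_name]["settlements"] += 1
--         elif feature == "Dungeon":
--             region_control[region_name]["dungeons"] += 1
--
--     return region_control
-- ===== SOURCE B (Python) =====
-- def _map_political_control(map_tiles: list, regions: dict) -> dict:
--     """Map political control patterns (group-first, aggregate-second)."""
--     groups = {}
--     for tile in map_tiles:
--         name = regions.get(tile.get("region"), "Unknown")
--         groups.setdefault(name, []).append(tile)
--     return {
--         name: {
--             "tiles": len(ts),
--             "settlements": sum(1 for t in ts if t.get("feature", "") in ("Village", "Town", "City")),
--             "dungeons": sum(1 for t in ts if t.get("feature", "") == "Dungeon"),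
--         }
--         for name, ts in groups.items()
--     }
-- ===== Notes on version B (the rewrite author's own statement) =====
-- stated objective: alternative
-- what changed: Replaces the single fused fold that increments three counters per tile inside a nested dict with a two-phase computation: one pass groups tiles by resolved region name (insertion order preserved), a second pass over the groups computes each region's counts from its tile list.
import Mathlib
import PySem

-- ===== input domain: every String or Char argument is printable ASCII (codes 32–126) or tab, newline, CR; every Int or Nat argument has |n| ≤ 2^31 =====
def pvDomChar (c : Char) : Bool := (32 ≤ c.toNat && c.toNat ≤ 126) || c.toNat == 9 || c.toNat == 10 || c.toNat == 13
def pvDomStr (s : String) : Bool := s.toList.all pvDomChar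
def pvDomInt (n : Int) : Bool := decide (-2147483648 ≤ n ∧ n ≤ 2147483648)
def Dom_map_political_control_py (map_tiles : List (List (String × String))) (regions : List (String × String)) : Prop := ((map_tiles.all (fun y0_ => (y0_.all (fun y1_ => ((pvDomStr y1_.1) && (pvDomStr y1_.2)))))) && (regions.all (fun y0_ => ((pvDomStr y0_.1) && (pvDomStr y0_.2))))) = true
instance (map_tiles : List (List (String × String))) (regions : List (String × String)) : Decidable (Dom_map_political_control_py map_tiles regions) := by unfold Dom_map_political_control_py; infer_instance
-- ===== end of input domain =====

-- B replaces A's fused per-tile triple-counter update with a group-by-region pass followed by a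
-- counting pass per group (alternative decomposition, same cost).

-- shared sub-expression of both Pythons: regions.get(tile.get("region"), "Unknown")
def pcName (regions : List (String × String)) (tile : List (String × String)) : String :=
  match (PySem.Dict.mk tile).get? "region" with
  | some rid => (PySem.Dict.mk regions).getD rid "Unknown"
  | none => "Unknown"

-- tile.get("feature", "")
def pcFeature (tile : List (String × String)) : String :=
  (PySem.Dict.mk tile).getD "feature" ""

-- ===== PORT A =====
def map_political_control_py (map_tiles : List (List (String × String))) (regions : List (String × String)) : List (String × List (String × Int)) :=
  (map_tiles.foldl (fun region_control tile =>
    let region_name := pcName regions tile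
    let region_control :=
      if region_control.contains region_name then region_control
      else region_control.insert region_name
        (PySem.Dict.mk [("tiles", (0 : Int)), ("settlements", 0), ("dungeons", 0)])
    let region_control := region_control.modify region_name PySem.Dict.empty
      (fun d => d.modify "tiles" 0 (· + 1))
    let feature := pcFeature tile
    if feature ∈ (["Village", "Town", "City"] : List String) then
      region_control.modify region_name PySem.Dict.empty
        (fun d => d.modify "settlements" 0 (· + 1))
    else if feature = "Dungeon" then
      region_control.modify region_name PySem.Dict.empty
        (fun d => d.modify "dungeons" 0 (· + 1))
    else region_control) PySem.Dict.empty).items.map (fun p => (p.1, p.2.items))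

-- ===== PORT B =====
def map_political_control_py_alt (map_tiles : List (List (String × String))) (regions : List (String × String)) : List (String × List (String × Int)) :=
  let groups := map_tiles.foldl
    (fun g tile => g.modify (pcName regions tile) [] (· ++ [tile])) PySem.Dict.empty
  groups.items.map (fun p =>
    (p.1,
      [("tiles", (p.2.length : Int)),
       ("settlements", p.2.foldl
          (fun a t => if pcFeature t ∈ (["Village", "Town", "City"] : List String) then a + 1 else a) 0),
       ("dungeons", p.2.foldl
          (fun a t => if pcFeature t = "Dungeon" then a + 1 else a) 0)]))

-- ===== PRECONDITION & SPEC =====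
def Spec_map_political_control_py (map_tiles : List (List (String × String))) (regions : List (String × String)) (out : List (String × List (String × Int))) : Prop := out = map_political_control_py_alt map_tiles regions
instance (map_tiles : List (List (String × String))) (regions : List (String × String)) (out : List (String × List (String × Int))) : Decidable (Spec_map_political_control_py map_tiles regions out) := by unfold Spec_map_political_control_py; infer_instance

-- ===== CLAIM (what is proved, stated in full; the proofs are below) =====
def Claim_equal_map_political_control_py : Prop := ∀ (map_tiles : List (List (String × String))) (regions : List (String × String)), Dom_map_political_control_py map_tiles regions → Spec_map_political_control_py map_tiles regions (map_political_control_py map_tiles regions)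

-- ===== LEMMAS AND PROOFS =====

-- counts of a group, as B's second pass computes them (inner dict form)
def pcCounts (ts : List (List (String × String))) : PySem.Dict String Int :=
  PySem.Dict.mk
    [("tiles", (ts.length : Int)),
     ("settlements", ts.foldl
        (fun a t => if pcFeature t ∈ (["Village", "Town", "City"] : List String) then a + 1 else a) 0),
     ("dungeons", ts.foldl
        (fun a t => if pcFeature t = "Dungeon" then a + 1 else a) 0)]

lemma pc_modify_modify {ν : Type} (d : PySem.Dict String ν) (k : String) (d0 : ν)
    (f g : ν → ν) :
    (d.modify k d0 f).modify k d0 g = d.modify k d0 (fun v => g (f v)) := by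
  show ((d.insert k (f (d.getD k d0))).insert k
      (g ((d.insert k (f (d.getD k d0))).getD k d0))) = _
  rw [PySem.Dict.getD_insert_self, PySem.Dict.insert_insert_self]
  rfl

lemma pc_keys_modify {ν : Type} (d : PySem.Dict String ν) (k : String) (d0 : ν) (f : ν → ν) :
    (d.modify k d0 f).keys = if d.contains k = true then d.keys else d.keys ++ [k] := by
  rw [PySem.Dict.keys_modify]
  by_cases h : d.contains k = true
  · rw [if_pos h, PySem.Dict.keys_insert_of_contains _ _ h]
  · rw [if_neg h, PySem.Dict.keys_insert_of_not_contains _ _ (by simpa using h)]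

-- A's per-tile inner update applied to pcCounts ts is pcCounts (ts ++ [t])
lemma pcCounts_step_mem (ts : List (List (String × String))) (t : List (String × String))
    (h1 : pcFeature t ∈ (["Village", "Town", "City"] : List String)) :
    ((pcCounts ts).modify "tiles" 0 (· + 1)).modify "settlements" 0 (· + 1)
      = pcCounts (ts ++ [t]) := by
  simp only [pcCounts, List.foldl_append, List.foldl_cons, List.foldl_nil, List.length_append,
    List.length_cons, List.length_nil]
  have h2 : ¬ pcFeature t = "Dungeon" := by
    intro h; rw [h] at h1; simp at h1
  simp [h1, h2, PySem.Dict.modify, PySem.Dict.insert, PySem.Dict.getD, PySem.Dict.get?,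
    PySem.Dict.contains]

lemma pcCounts_step_dungeon (ts : List (List (String × String))) (t : List (String × String))
    (h2 : pcFeature t = "Dungeon") :
    ((pcCounts ts).modify "tiles" 0 (· + 1)).modify "dungeons" 0 (· + 1)
      = pcCounts (ts ++ [t]) := by
  simp only [pcCounts, List.foldl_append, List.foldl_cons, List.foldl_nil, List.length_append,
    List.length_cons, List.length_nil]
  simp [h2, PySem.Dict.modify, PySem.Dict.insert, PySem.Dict.getD, PySem.Dict.get?,
    PySem.Dict.contains]

lemma pcCounts_step_other (ts : List (List (String × String))) (t : List (String × String))
    (h1 : ¬ pcFeature t ∈ (["Village", "Town", "City"] : List String))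
    (h2 : ¬ pcFeature t = "Dungeon") :
    (pcCounts ts).modify "tiles" 0 (· + 1) = pcCounts (ts ++ [t]) := by
  simp only [pcCounts, List.foldl_append, List.foldl_cons, List.foldl_nil, List.length_append,
    List.length_cons, List.length_nil]
  simp [h1, h2, PySem.Dict.modify, PySem.Dict.insert, PySem.Dict.getD, PySem.Dict.get?,
    PySem.Dict.contains]

-- the fold invariant: A's accumulator has the same keys as B's grouping, and at every
-- present key it holds exactly the counts of that key's group
def pcRel (rc : PySem.Dict String (PySem.Dict String Int))
    (g : PySem.Dict String (List (List (String × String)))) : Prop :=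
  rc.keys = g.keys ∧
    ∀ c, rc.contains c = true → rc.getD c PySem.Dict.empty = pcCounts (g.getD c [])

lemma pcRel_core (rc : PySem.Dict String (PySem.Dict String Int))
    (g : PySem.Dict String (List (List (String × String)))) (n : String)
    (t : List (String × String)) (u : PySem.Dict String Int → PySem.Dict String Int)
    (h : pcRel rc g) (hu : ∀ ts, u (pcCounts ts) = pcCounts (ts ++ [t])) :
    pcRel
      ((if rc.contains n then rc
        else rc.insert n
          (PySem.Dict.mk [("tiles", (0 : Int)), ("settlements", 0), ("dungeons", 0)])).modify
        n PySem.Dict.empty u)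
      (g.modify n [] (· ++ [t])) := by
  obtain ⟨hk, hv⟩ := h
  have hc : rc.contains n = g.contains n := by
    rw [PySem.Dict.contains_eq_decide_mem_keys, PySem.Dict.contains_eq_decide_mem_keys, hk]
  have hzero : PySem.Dict.mk [("tiles", (0 : Int)), ("settlements", 0), ("dungeons", 0)]
      = pcCounts [] := rfl
  by_cases hgc : g.contains n = true
  · have hrc : rc.contains n = true := by rw [hc, hgc]
    rw [if_pos hrc]
    constructor
    · rw [pc_keys_modify, pc_keys_modify, if_pos hrc, if_pos hgc, hk]
    · intro c hcont
      rw [PySem.Dict.contains_modify] at hcont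
      by_cases hcn : c = n
      · subst hcn
        rw [PySem.Dict.getD_modify_self, PySem.Dict.getD_modify_self, hv c hrc, hu]
      · have hcc : rc.contains c = true := by
          simpa [hcn] using hcont
        rw [PySem.Dict.getD_modify_of_ne _ _ _ hcn, PySem.Dict.getD_modify_of_ne _ _ _ hcn,
          hv c hcc]
  · have hrc : rc.contains n = false := by
      rw [hc]; simpa using hgc
    rw [if_neg (by simp [hrc])]
    constructor
    · rw [pc_keys_modify, pc_keys_modify, if_pos (PySem.Dict.contains_insert_self rc n _),
        if_neg (by simp [hgc]), PySem.Dict.keys_insert_of_not_contains _ _ hrc, hk]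
    · intro c hcont
      rw [PySem.Dict.contains_modify] at hcont
      by_cases hcn : c = n
      · subst hcn
        rw [PySem.Dict.getD_modify_self, PySem.Dict.getD_modify_self,
          PySem.Dict.getD_insert_self, PySem.Dict.getD_of_not_contains _ _ (by simpa using hgc),
          hzero, hu]
      · have hcc : rc.contains c = true := by
          rw [PySem.Dict.contains_insert] at hcont
          simpa [hcn] using hcont
        rw [PySem.Dict.getD_modify_of_ne _ _ _ hcn, PySem.Dict.getD_modify_of_ne _ _ _ hcn,
          PySem.Dict.getD_insert_of_ne _ _ _ hcn, hv c hcc]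

lemma pcRel_step (regions : List (String × String))
    (rc : PySem.Dict String (PySem.Dict String Int))
    (g : PySem.Dict String (List (List (String × String)))) (t : List (String × String))
    (h : pcRel rc g) :
    pcRel
      (let region_name := pcName regions t
       let region_control :=
         if rc.contains region_name then rc
         else rc.insert region_name
           (PySem.Dict.mk [("tiles", (0 : Int)), ("settlements", 0), ("dungeons", 0)])
       let region_control := region_control.modify region_name PySem.Dict.empty
         (fun d => d.modify "tiles" 0 (· + 1))
       let feature := pcFeature t
       if feature ∈ (["Village", "Town", "City"] : List String) then
         region_control.modify region_name PySem.Dict.empty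
           (fun d => d.modify "settlements" 0 (· + 1))
       else if feature = "Dungeon" then
         region_control.modify region_name PySem.Dict.empty
           (fun d => d.modify "dungeons" 0 (· + 1))
       else region_control)
      (g.modify (pcName regions t) [] (· ++ [t])) := by
  dsimp only
  by_cases h1 : pcFeature t ∈ (["Village", "Town", "City"] : List String)
  · rw [if_pos h1, pc_modify_modify]
    exact pcRel_core rc g _ t _ h (fun ts => pcCounts_step_mem ts t h1)
  · by_cases h2 : pcFeature t = "Dungeon"
    · rw [if_neg h1, if_pos h2, pc_modify_modify]
      exact pcRel_core rc g _ t _ h (fun ts => pcCounts_step_dungeon ts t h2)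
    · rw [if_neg h1, if_neg h2]
      exact pcRel_core rc g _ t _ h (fun ts => pcCounts_step_other ts t h1 h2)

lemma pcRel_fold (map_tiles : List (List (String × String))) (regions : List (String × String))
    (rc : PySem.Dict String (PySem.Dict String Int))
    (g : PySem.Dict String (List (List (String × String)))) (h : pcRel rc g) :
    pcRel
      (map_tiles.foldl (fun region_control tile =>
        let region_name := pcName regions tile
        let region_control :=
          if region_control.contains region_name then region_control
          else region_control.insert region_name
            (PySem.Dict.mk [("tiles", (0 : Int)), ("settlements", 0), ("dungeons", 0)])
        let region_control := region_control.modify region_name PySem.Dict.empty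
          (fun d => d.modify "tiles" 0 (· + 1))
        let feature := pcFeature tile
        if feature ∈ (["Village", "Town", "City"] : List String) then
          region_control.modify region_name PySem.Dict.empty
            (fun d => d.modify "settlements" 0 (· + 1))
        else if feature = "Dungeon" then
          region_control.modify region_name PySem.Dict.empty
            (fun d => d.modify "dungeons" 0 (· + 1))
        else region_control) rc)
      (map_tiles.foldl (fun g tile => g.modify (pcName regions tile) [] (· ++ [tile])) g) := by
  induction map_tiles generalizing rc g with
  | nil => exact h
  | cons t ts ih =>
    rw [List.foldl_cons, List.foldl_cons]
    exact ih _ _ (pcRel_step regions rc g t h)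

-- ===== VERDICT (by name: the statement is the Claim_ definition above) =====
theorem map_political_control_py_spec : Claim_equal_map_political_control_py := by
  intro map_tiles regions _
  unfold Spec_map_political_control_py map_political_control_py map_political_control_py_alt
  dsimp only
  obtain ⟨hk, hv⟩ := pcRel_fold map_tiles regions PySem.Dict.empty PySem.Dict.empty
    ⟨rfl, by intro c hcont; rw [PySem.Dict.contains_empty] at hcont; cases hcont⟩
  dsimp only at hk hv
  have hnodB : (map_tiles.foldl
      (fun g tile => g.modify (pcName regions tile) [] (· ++ [tile]))
      PySem.Dict.empty).keys.Nodup :=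
    PySem.Dict.nodup_keys_foldl_modify_key map_tiles (pcName regions) []
      (fun _ tile v => v ++ [tile]) PySem.Dict.empty PySem.Dict.nodup_keys_empty
  have hnodA := hnodB
  rw [← hk] at hnodA
  rw [PySem.Dict.items_eq_map_keys _ hnodA PySem.Dict.empty,
    PySem.Dict.items_eq_map_keys _ hnodB [], hk, List.map_map, List.map_map]
  apply List.map_congr_left
  intro k hkmem
  have hcont := hkmem
  rw [← PySem.Dict.contains_iff_mem_keys] at hkmem
  simp only [Function.comp_apply]
  rw [hv k (by rw [PySem.Dict.contains_eq_decide_mem_keys, hk]; simpa using hcont)]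
  rfl
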